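-- pv_equiv track=rewrite | github.com/LimbicNode42/competition-auto-entry | competition_auto_entry.py | _classify_field_type
-- ===== SOURCE A (Python) =====
-- def _classify_field_type(label_text: str) -> str:
--     """Classify the type of form field based on label text"""
--     label_lower = label_text.lower()
--
--     # Email field detection
--     if any(keyword in label_lower for keyword in ['email', 'e-mail', 'mail']):
--         return 'email'
--     # Name field detection
--     elif any(keyword in label_lower for keyword in ['first', 'given', 'fname', 'firstname']):
--         return 'first_name'
--     elif any(keyword in label_lower for keyword in ['last', 'surname', 'family', 'lname', 'lastname']):
--         return 'last_name'
--     elif any(keyword in label_lower for keyword in ['name']) and not any(word in label_lower for word in ['first', 'last', 'user']):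
--         return 'first_name'  # Assume general "name" field is first name
--     # Contact info
--     elif any(keyword in label_lower for keyword in ['phone', 'mobile', 'tel', 'number']):
--         return 'phone'
--     # Address fields
--     elif any(keyword in label_lower for keyword in ['address', 'street']):
--         return 'address'
--     elif any(keyword in label_lower for keyword in ['city', 'town']):
--         return 'city'
--     elif any(keyword in label_lower for keyword in ['state', 'province']):
--         return 'state'
--     elif any(keyword in label_lower for keyword in ['zip', 'postal', 'postcode']):
--         return 'postal_code'
--     # Terms and checkboxes
--     elif any(keyword in label_lower for keyword in ['terms', 'conditions', 'agree', 'accept']):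
--         return 'terms'
--     elif any(keyword in label_lower for keyword in ['marketing', 'newsletter', 'subscribe']):
--         return 'checkbox'
--     # Common form fields
--     elif any(keyword in label_lower for keyword in ['custname', 'customer', 'comments', 'message']):
--         # Try to guess based on context
--         if 'name' in label_lower:
--             return 'first_name'
--         else:
--             return 'comments'
--     else:
--         return 'unknown'
-- ===== SOURCE B (Python) =====
-- # B: one positional scan collects the set of keywords occurring in the label
-- # (a naive multi-pattern matcher), then the type is decided purely from that
-- # set — no per-branch substring searches.
-- _KEYWORDS = [
--     'email', 'e-mail', 'mail', 'first', 'given', 'fname', 'firstname',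
--     'last', 'surname', 'family', 'lname', 'lastname', 'name', 'user',
--     'phone', 'mobile', 'tel', 'number', 'address', 'street', 'city', 'town',
--     'state', 'province', 'zip', 'postal', 'postcode', 'terms', 'conditions',
--     'agree', 'accept', 'marketing', 'newsletter', 'subscribe',
--     'custname', 'customer', 'comments', 'message',
-- ]
--
--
-- def _classify_field_type(label_text: str) -> str:
--     label_lower = label_text.lower()
--     # Stage 1: scan every position once, recording each keyword that starts there.
--     found = set()
--     for i in range(len(label_lower)):
--         for kw in _KEYWORDS:
--             if label_lower.startswith(kw, i):
--                 found.add(kw)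
--     # Stage 2: pure decision over the collected keyword set.
--     if 'email' in found or 'e-mail' in found or 'mail' in found:
--         return 'email'
--     elif 'first' in found or 'given' in found or 'fname' in found or 'firstname' in found:
--         return 'first_name'
--     elif 'last' in found or 'surname' in found or 'family' in found or 'lname' in found or 'lastname' in found:
--         return 'last_name'
--     elif 'name' in found and not ('first' in found or 'last' in found or 'user' in found):
--         return 'first_name'
--     elif 'phone' in found or 'mobile' in found or 'tel' in found or 'number' in found:
--         return 'phone'
--     elif 'address' in found or 'street' in found:
--         return 'address'
--     elif 'city' in found or 'town' in found:
--         return 'city'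
--     elif 'state' in found or 'province' in found:
--         return 'state'
--     elif 'zip' in found or 'postal' in found or 'postcode' in found:
--         return 'postal_code'
--     elif 'terms' in found or 'conditions' in found or 'agree' in found or 'accept' in found:
--         return 'terms'
--     elif 'marketing' in found or 'newsletter' in found or 'subscribe' in found:
--         return 'checkbox'
--     elif 'custname' in found or 'customer' in found or 'comments' in found or 'message' in found:
--         return 'first_name' if 'name' in found else 'comments'
--     else:
--         return 'unknown'
-- ===== Notes on version B (the rewrite author's own statement) =====
-- stated objective: alternative
-- what changed: Replaces A's cascade of per-branch substring searches by a two-stage algorithm: one positional scan of the label (a naive multi-pattern matcher via startswith at each index) collects the set of keywords occurring, and the type is then decided purely from membership in that precomputed set.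
import Mathlib
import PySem

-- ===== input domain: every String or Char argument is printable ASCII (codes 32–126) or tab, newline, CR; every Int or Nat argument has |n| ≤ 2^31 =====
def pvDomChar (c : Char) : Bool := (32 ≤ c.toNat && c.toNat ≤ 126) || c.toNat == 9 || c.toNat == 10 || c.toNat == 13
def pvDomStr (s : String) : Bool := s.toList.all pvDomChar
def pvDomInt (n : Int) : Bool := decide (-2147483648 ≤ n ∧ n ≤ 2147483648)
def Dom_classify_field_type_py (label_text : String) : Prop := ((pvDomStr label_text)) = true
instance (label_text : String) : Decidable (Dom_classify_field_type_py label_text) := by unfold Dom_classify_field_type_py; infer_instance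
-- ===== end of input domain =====

-- B replaces A's cascade of per-branch substring searches by one positional scan that
-- collects the set of occurring keywords, then a pure decision over that set (objective: alternative).

-- ===== PORT A =====
def classify_field_type_py (label_text : String) : String :=
  let label_lower := PySem.Str.lower label_text
  if (["email", "e-mail", "mail"].any (fun k => PySem.Str.isIn k label_lower)) then "email"
  else if (["first", "given", "fname", "firstname"].any (fun k => PySem.Str.isIn k label_lower)) then "first_name"
  else if (["last", "surname", "family", "lname", "lastname"].any (fun k => PySem.Str.isIn k label_lower)) then "last_name"
  else if (["name"].any (fun k => PySem.Str.isIn k label_lower)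
           && !(["first", "last", "user"].any (fun w => PySem.Str.isIn w label_lower))) then "first_name"
  else if (["phone", "mobile", "tel", "number"].any (fun k => PySem.Str.isIn k label_lower)) then "phone"
  else if (["address", "street"].any (fun k => PySem.Str.isIn k label_lower)) then "address"
  else if (["city", "town"].any (fun k => PySem.Str.isIn k label_lower)) then "city"
  else if (["state", "province"].any (fun k => PySem.Str.isIn k label_lower)) then "state"
  else if (["zip", "postal", "postcode"].any (fun k => PySem.Str.isIn k label_lower)) then "postal_code"
  else if (["terms", "conditions", "agree", "accept"].any (fun k => PySem.Str.isIn k label_lower)) then "terms"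
  else if (["marketing", "newsletter", "subscribe"].any (fun k => PySem.Str.isIn k label_lower)) then "checkbox"
  else if (["custname", "customer", "comments", "message"].any (fun k => PySem.Str.isIn k label_lower)) then
    (if PySem.Str.isIn "name" label_lower then "first_name" else "comments")
  else "unknown"

-- ===== PORT B =====
def pvKeywords : List String :=
  ["email", "e-mail", "mail", "first", "given", "fname", "firstname",
   "last", "surname", "family", "lname", "lastname", "name", "user",
   "phone", "mobile", "tel", "number", "address", "street", "city", "town",
   "state", "province", "zip", "postal", "postcode", "terms", "conditions",
   "agree", "accept", "marketing", "newsletter", "subscribe",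
   "custname", "customer", "comments", "message"]

-- Stage 1 of Source B: for i in range(len(s)): for kw in _KEYWORDS: if s.startswith(kw, i): found.add(kw).
-- Python's s.startswith(kw, i) with 0 ≤ i is exactly Chars.startswith (cs.drop i) kw.toList.
def pvScan (cs : List Char) : PySem.Set String :=
  (List.range cs.length).foldl
    (fun acc i => pvKeywords.foldl
      (fun acc kw => if PySem.Chars.startswith (cs.drop i) kw.toList then PySem.Set.add acc kw else acc) acc)
    PySem.Set.empty

def classify_field_type_py_alt (label_text : String) : String :=
  let found := pvScan (PySem.Str.lower label_text).toList
  let has := fun (k : String) => PySem.Set.contains found k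
  if has "email" || has "e-mail" || has "mail" then "email"
  else if has "first" || has "given" || has "fname" || has "firstname" then "first_name"
  else if has "last" || has "surname" || has "family" || has "lname" || has "lastname" then "last_name"
  else if has "name" && !(has "first" || has "last" || has "user") then "first_name"
  else if has "phone" || has "mobile" || has "tel" || has "number" then "phone"
  else if has "address" || has "street" then "address"
  else if has "city" || has "town" then "city"
  else if has "state" || has "province" then "state"
  else if has "zip" || has "postal" || has "postcode" then "postal_code"
  else if has "terms" || has "conditions" || has "agree" || has "accept" then "terms"
  else if has "marketing" || has "newsletter" || has "subscribe" then "checkbox"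
  else if has "custname" || has "customer" || has "comments" || has "message" then
    (if has "name" then "first_name" else "comments")
  else "unknown"

-- ===== PRECONDITION & SPEC =====
def Spec_classify_field_type_py (label_text : String) (out : String) : Prop := out = classify_field_type_py_alt label_text
instance (label_text : String) (out : String) : Decidable (Spec_classify_field_type_py label_text out) := by unfold Spec_classify_field_type_py; infer_instance

-- ===== CLAIM (what is proved, stated in full; the proofs are below) =====
def Claim_equal_classify_field_type_py : Prop := ∀ (label_text : String), Dom_classify_field_type_py label_text → Spec_classify_field_type_py label_text (classify_field_type_py label_text)

-- ===== LEMMAS AND PROOFS =====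

lemma pv_mem_inner (cs : List Char) (i : Nat) (ks : List String) (acc : PySem.Set String) (k : String) :
    k ∈ ks.foldl
      (fun acc kw => if PySem.Chars.startswith (cs.drop i) kw.toList then PySem.Set.add acc kw else acc) acc ↔
    k ∈ acc ∨ (k ∈ ks ∧ PySem.Chars.startswith (cs.drop i) k.toList = true) := by
  induction ks generalizing acc with
  | nil => simp
  | cons kw ks ih =>
      simp only [List.foldl_cons, ih]
      by_cases h : PySem.Chars.startswith (cs.drop i) kw.toList = true
      · simp only [h, if_true, PySem.Set.mem_add, List.mem_cons]
        constructor
        · rintro ((ha | rfl) | hrest)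
          · exact Or.inl ha
          · exact Or.inr ⟨Or.inl rfl, h⟩
          · exact Or.inr ⟨Or.inr hrest.1, hrest.2⟩
        · rintro (ha | ⟨(rfl | hm), hs⟩)
          · exact Or.inl (Or.inl ha)
          · exact Or.inl (Or.inr rfl)
          · exact Or.inr ⟨hm, hs⟩
      · simp only [Bool.not_eq_true] at h
        simp only [h, Bool.false_eq_true, if_false, List.mem_cons]
        constructor
        · rintro (ha | hrest)
          · exact Or.inl ha
          · exact Or.inr ⟨Or.inr hrest.1, hrest.2⟩
        · rintro (ha | ⟨(rfl | hm), hs⟩)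
          · exact Or.inl ha
          · exact absurd hs (by simp [h])
          · exact Or.inr ⟨hm, hs⟩

lemma pv_mem_outer (cs : List Char) (rs : List Nat) (acc : PySem.Set String) (k : String) :
    k ∈ rs.foldl
      (fun acc i => pvKeywords.foldl
        (fun acc kw => if PySem.Chars.startswith (cs.drop i) kw.toList then PySem.Set.add acc kw else acc) acc) acc ↔
    k ∈ acc ∨ (k ∈ pvKeywords ∧ ∃ i ∈ rs, PySem.Chars.startswith (cs.drop i) k.toList = true) := by
  induction rs generalizing acc with
  | nil => simp
  | cons r rs ih =>
      simp only [List.foldl_cons, ih, pv_mem_inner, List.mem_cons]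
      constructor
      · rintro ((ha | ⟨hm, hs⟩) | ⟨hm, i, hi, hs⟩)
        · exact Or.inl ha
        · exact Or.inr ⟨hm, r, Or.inl rfl, hs⟩
        · exact Or.inr ⟨hm, i, Or.inr hi, hs⟩
      · rintro (ha | ⟨hm, i, (rfl | hi), hs⟩)
        · exact Or.inl (Or.inl ha)
        · exact Or.inl (Or.inr ⟨hm, hs⟩)
        · exact Or.inr ⟨hm, i, hi, hs⟩

lemma pv_mem_scan (cs : List Char) (k : String) :
    k ∈ pvScan cs ↔ k ∈ pvKeywords ∧ ∃ i < cs.length, PySem.Chars.startswith (cs.drop i) k.toList = true := by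
  unfold pvScan
  rw [pv_mem_outer]
  simp [PySem.Set.empty, List.mem_range]

lemma pv_scan_contains (cs : List Char) (k : String) (hk : k ∈ pvKeywords) (hne : k.toList ≠ []) :
    PySem.Set.contains (pvScan cs) k = PySem.Chars.isIn k.toList cs := by
  cases h : PySem.Chars.isIn k.toList cs with
  | false =>
      refine Bool.eq_false_iff.mpr fun hc => ?_
      obtain ⟨-, i, -, hs⟩ := (pv_mem_scan cs k).mp ((PySem.Set.contains_iff _ _).mp hc)
      have : PySem.Chars.isIn k.toList cs = true :=
        (PySem.Chars.exists_prefix_drop_iff_isIn k.toList cs).mp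
          ⟨i, (PySem.Chars.startswith_iff _ _).mp hs⟩
      simp [this] at h
  | true =>
      obtain ⟨j, hj⟩ := (PySem.Chars.exists_prefix_drop_iff_isIn k.toList cs).mpr h
      have hjlt : j < cs.length := by
        by_contra hge
        rw [List.drop_eq_nil_of_le (Nat.le_of_not_lt hge)] at hj
        exact hne (List.prefix_nil.mp hj)
      exact (PySem.Set.contains_iff _ _).mpr
        ((pv_mem_scan cs k).mpr ⟨hk, j, hjlt, (PySem.Chars.startswith_iff _ _).mpr hj⟩)

-- ===== VERDICT (by name: the statement is the Claim_ definition above) =====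
theorem classify_field_type_py_spec : Claim_equal_classify_field_type_py := by
  intro label_text _
  unfold Spec_classify_field_type_py classify_field_type_py classify_field_type_py_alt
  simp only [List.any_cons, List.any_nil, Bool.or_false, PySem.Str.isIn_eq, Bool.or_assoc]
  have hs := pv_scan_contains (PySem.Str.lower label_text).toList
  simp only [hs "email" (by decide) (by decide),
    hs "e-mail" (by decide) (by decide),
    hs "mail" (by decide) (by decide),
    hs "first" (by decide) (by decide),
    hs "given" (by decide) (by decide),
    hs "fname" (by decide) (by decide),
    hs "firstname" (by decide) (by decide),
    hs "last" (by decide) (by decide),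
    hs "surname" (by decide) (by decide),
    hs "family" (by decide) (by decide),
    hs "lname" (by decide) (by decide),
    hs "lastname" (by decide) (by decide),
    hs "name" (by decide) (by decide),
    hs "user" (by decide) (by decide),
    hs "phone" (by decide) (by decide),
    hs "mobile" (by decide) (by decide),
    hs "tel" (by decide) (by decide),
    hs "number" (by decide) (by decide),
    hs "address" (by decide) (by decide),
    hs "street" (by decide) (by decide),
    hs "city" (by decide) (by decide),
    hs "town" (by decide) (by decide),
    hs "state" (by decide) (by decide),
    hs "province" (by decide) (by decide),
    hs "zip" (by decide) (by decide),
    hs "postal" (by decide) (by decide),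
    hs "postcode" (by decide) (by decide),
    hs "terms" (by decide) (by decide),
    hs "conditions" (by decide) (by decide),
    hs "agree" (by decide) (by decide),
    hs "accept" (by decide) (by decide),
    hs "marketing" (by decide) (by decide),
    hs "newsletter" (by decide) (by decide),
    hs "subscribe" (by decide) (by decide),
    hs "custname" (by decide) (by decide),
    hs "customer" (by decide) (by decide),
    hs "comments" (by decide) (by decide),
    hs "message" (by decide) (by decide)]
  rfl
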